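-- pv_equiv track=rewrite | github.com/AdamOtto/Daily-Challenges | Challenge352.py | acrossHelper
-- ===== SOURCE A (Python) =====
-- def acrossHelper(i,j, board, N):
--     if board[i][j] == 1:
--         count = 1
--         for k in range(j + 1, N):
--             if board[i][k] == 0:
--                 break
--             count += 1
--         for k in reversed(range(0, j)):
--             if board[i][k] == 0:
--                 break
--             count += 1
--         return count
--     return 0
-- ===== SOURCE B (Python) =====
-- def acrossHelper(i, j, board, N):
--     row = board[i]
--     if row[j] != 1:
--         return 0
--     start = 0
--     for k in range(N):
--         if row[k] == 0:
--             if start <= j < k: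
--                 return k - start
--             start = k + 1
--     return N - start
-- ===== Notes on version B (the rewrite author's own statement) =====
-- stated objective: alternative
-- what changed: B replaces A's two outward-expanding break-loops from j with a single left-to-right pass over row indices 0..N-1 that tracks the start of the current nonzero run and returns the length of the run containing j.
-- outside the precondition, e.g. on acrossHelper(0, -1, [[1, 1]], 2): A returns 3, B returns 2; on acrossHelper(0, 1, [[1, 1]], 1): A returns 2, B returns 1; on acrossHelper(0, 0, [[1, 0]], 5): A returns 1, B returns 1
import Mathlib
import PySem

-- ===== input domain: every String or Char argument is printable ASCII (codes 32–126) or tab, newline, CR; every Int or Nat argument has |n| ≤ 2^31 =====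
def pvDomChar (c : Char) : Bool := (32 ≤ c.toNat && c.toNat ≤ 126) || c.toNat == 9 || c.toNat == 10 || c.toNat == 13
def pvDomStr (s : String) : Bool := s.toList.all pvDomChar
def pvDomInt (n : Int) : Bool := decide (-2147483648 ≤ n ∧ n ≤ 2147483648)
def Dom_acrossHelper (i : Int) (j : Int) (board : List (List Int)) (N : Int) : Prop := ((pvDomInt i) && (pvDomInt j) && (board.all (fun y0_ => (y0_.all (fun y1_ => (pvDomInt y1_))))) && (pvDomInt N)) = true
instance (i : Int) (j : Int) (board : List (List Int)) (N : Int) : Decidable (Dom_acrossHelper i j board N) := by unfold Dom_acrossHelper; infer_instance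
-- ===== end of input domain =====

-- B replaces A's two outward-expanding break-loops with one left-to-right run-tracking pass; same O(N) cost, different traversal.

-- ===== PORT A =====
-- 'for k in range(j+1, N): if board[i][k] == 0: break; count += 1'
def aRight (row : List Int) (ks : List Int) (count : Int) : Int :=
  match ks with
  | [] => count
  | k :: rest =>
    match PySem.List.pyGet? row k with
    | none => 0  -- Python raises IndexError here; excluded by Pre_
    | some v => if v = 0 then count else aRight row rest (count + 1)

-- 'for k in reversed(range(0, j)): if board[i][k] == 0: break; count += 1'
def aLeft (row : List Int) (ks : List Int) (count : Int) : Int :=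
  match ks with
  | [] => count
  | k :: rest =>
    match PySem.List.pyGet? row k with
    | none => 0  -- Python raises IndexError here; excluded by Pre_
    | some v => if v = 0 then count else aLeft row rest (count + 1)

def acrossHelper (i : Int) (j : Int) (board : List (List Int)) (N : Int) : Int :=
  match PySem.List.pyGet? board i with
  | none => 0  -- Python raises IndexError here; excluded by Pre_
  | some row =>
    match PySem.List.pyGet? row j with
    | none => 0  -- Python raises IndexError here; excluded by Pre_
    | some v =>
      if v = 1 then
        aLeft row ((PySem.List.pyRange 0 j 1).reverse)
          (aRight row (PySem.List.pyRange (j + 1) N 1) 1)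
      else 0

-- ===== PORT B =====
-- single pass: 'start' is the start index of the current nonzero run; a zero at k
-- closes the run [start, k): if it contains j, its length is the answer.
def bLoop (row : List Int) (j : Int) (ks : List Int) (start : Int) (N : Int) : Int :=
  match ks with
  | [] => N - start
  | k :: rest =>
    match PySem.List.pyGet? row k with
    | none => 0  -- Python raises IndexError here; excluded by Pre_
    | some v =>
      if v = 0 then
        if start ≤ j ∧ j < k then k - start
        else bLoop row j rest (k + 1) N
      else bLoop row j rest start N

def acrossHelper_alt (i : Int) (j : Int) (board : List (List Int)) (N : Int) : Int :=
  match PySem.List.pyGet? board i with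
  | none => 0  -- Python raises IndexError here; excluded by Pre_
  | some row =>
    match PySem.List.pyGet? row j with
    | none => 0  -- Python raises IndexError here; excluded by Pre_
    | some v =>
      if v ≠ 1 then 0
      else bLoop row j (PySem.List.pyRange 0 N 1) 0 N

-- ===== PRECONDITION & SPEC =====
-- When board[i][j] = 1, Pre_ additionally excludes: negative j (A then returns a count
-- via accidental negative-index wraparound), j ≥ N (A returns an accidental partial
-- left-scan count), and N beyond the row length (A may raise IndexError mid-scan).
def Pre_acrossHelper (i : Int) (j : Int) (board : List (List Int)) (N : Int) : Prop :=
  PySem.Raise.InRange board.length i ∧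
  PySem.Raise.InRange (PySem.List.pyGetD board i []).length j ∧
  (PySem.List.pyGetD (PySem.List.pyGetD board i []) j 0 ≠ 1 ∨
    (0 ≤ j ∧ j < N ∧ N ≤ ((PySem.List.pyGetD board i []).length : Int)))
instance (i : Int) (j : Int) (board : List (List Int)) (N : Int) : Decidable (Pre_acrossHelper i j board N) := by unfold Pre_acrossHelper; infer_instance

def pvWitness_acrossHelper : Int × Int × List (List Int) × Int := (0, 1, [[1, 1, 0]], 3)

def Spec_acrossHelper (i : Int) (j : Int) (board : List (List Int)) (N : Int) (out : Int) : Prop := out = acrossHelper_alt i j board N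
instance (i : Int) (j : Int) (board : List (List Int)) (N : Int) (out : Int) : Decidable (Spec_acrossHelper i j board N out) := by unfold Spec_acrossHelper; infer_instance

-- ===== CLAIM (what is proved, stated in full; the proofs are below) =====
def Claim_equal_acrossHelper : Prop := ∀ (i : Int) (j : Int) (board : List (List Int)) (N : Int), Dom_acrossHelper i j board N → Pre_acrossHelper i j board N → Spec_acrossHelper i j board N (acrossHelper i j board N)

-- ===== LEMMAS AND PROOFS =====

-- one-step unfolding lemmas for the three loops
lemma aRight_nil (row : List Int) (c : Int) : aRight row [] c = c := rfl
lemma aLeft_nil (row : List Int) (c : Int) : aLeft row [] c = c := rfl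
lemma bLoop_nil (row : List Int) (j start N : Int) : bLoop row j [] start N = N - start := rfl

lemma aRight_cons_some (row : List Int) (k : Int) (rest : List Int) (c v : Int)
    (h : PySem.List.pyGet? row k = some v) :
    aRight row (k :: rest) c = if v = 0 then c else aRight row rest (c + 1) := by
  simp [aRight, h]

lemma aLeft_cons_some (row : List Int) (k : Int) (rest : List Int) (c v : Int)
    (h : PySem.List.pyGet? row k = some v) :
    aLeft row (k :: rest) c = if v = 0 then c else aLeft row rest (c + 1) := by
  simp [aLeft, h]

lemma bLoop_cons_some (row : List Int) (j k : Int) (rest : List Int) (start N v : Int)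
    (h : PySem.List.pyGet? row k = some v) :
    bLoop row j (k :: rest) start N =
      if v = 0 then (if start ≤ j ∧ j < k then k - start else bLoop row j rest (k + 1) N)
      else bLoop row j rest start N := by
  simp [bLoop, h]

-- the start of the nonzero run, computed as B computes it: fold left over indices
def loF (row : List Int) (ks : List Int) (s : Int) : Int :=
  ks.foldl (fun st k => if (PySem.List.pyGet? row k).getD 1 = 0 then k + 1 else st) s

lemma loF_nil (row : List Int) (s : Int) : loF row [] s = s := rfl

lemma loF_cons (row : List Int) (k : Int) (ks : List Int) (s : Int) :
    loF row (k :: ks) s = loF row ks (if (PySem.List.pyGet? row k).getD 1 = 0 then k + 1 else s) := rfl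

lemma loF_le (row : List Int) (j : Int) :
    ∀ (ks : List Int) (s : Int), (∀ k ∈ ks, k + 1 ≤ j) → s ≤ j → loF row ks s ≤ j := by
  intro ks
  induction ks with
  | nil => intro s _ hs; simpa [loF_nil] using hs
  | cons k rest ih =>
    intro s hk hs
    rw [loF_cons]
    split
    · exact ih _ (fun x hx => hk x (List.mem_cons_of_mem _ hx)) (hk k (List.mem_cons_self))
    · exact ih _ (fun x hx => hk x (List.mem_cons_of_mem _ hx)) hs

-- phase 2 of B (indices past j) against A's right loop
lemma bLoop_eq_aRight (row : List Int) (j N : Int) (hN : N ≤ (row.length : Int)) :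
    ∀ (n : Nat) (a s c : Int), (N - a).toNat = n → 0 ≤ j → j < a → a ≤ N → s ≤ j →
      bLoop row j (PySem.List.pyRange a N 1) s N =
        aRight row (PySem.List.pyRange a N 1) c + a - c - s := by
  intro n
  induction n with
  | zero =>
    intro a s c hn _ _ haN _
    have hab : N ≤ a := by omega
    rw [PySem.List.pyRange_one_eq_nil hab, bLoop_nil, aRight_nil]
    omega
  | succ n ih =>
    intro a s c hn hj hja haN hs
    have ha : a < N := by omega
    have h0a : 0 ≤ a := by omega
    have halen : a < (row.length : Int) := by omega
    obtain ⟨v, hv⟩ : ∃ v, PySem.List.pyGet? row a = some v :=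
      ⟨_, PySem.List.pyGet?_eq_some_getElem row h0a halen⟩
    rw [PySem.List.pyRange_one_cons ha, bLoop_cons_some row j a _ s N v hv,
        aRight_cons_some row a _ c v hv]
    by_cases hz : v = 0
    · rw [if_pos hz, if_pos hz, if_pos ⟨hs, hja⟩]
      omega
    · rw [if_neg hz, if_neg hz, ih (a + 1) s (c + 1) (by omega) hj (by omega) (by omega) hs]
      omega

-- phase 1 of B (indices up to j): it only moves 'start', ending at loF
lemma bLoop_phase1 (row : List Int) (j N : Int) (hjN : j < N) (hN : N ≤ (row.length : Int))
    (vj : Int) (hvj : PySem.List.pyGet? row j = some vj) (hvj0 : vj ≠ 0) :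
    ∀ (n : Nat) (a s : Int), (j - a).toNat = n → 0 ≤ a → a ≤ j → s ≤ j →
      bLoop row j (PySem.List.pyRange a N 1) s N =
        bLoop row j (PySem.List.pyRange (j + 1) N 1) (loF row (PySem.List.pyRange a j 1) s) N := by
  intro n
  induction n with
  | zero =>
    intro a s hn h0a haj hs
    obtain rfl : a = j := by omega
    rw [PySem.List.pyRange_one_eq_nil (le_refl a), loF_nil,
        PySem.List.pyRange_one_cons (show a < N by omega),
        bLoop_cons_some row a a _ s N vj hvj, if_neg hvj0]
  | succ n ih =>
    intro a s hn h0a haj hs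
    have ha : a < j := by omega
    have halen : a < (row.length : Int) := by omega
    obtain ⟨v, hv⟩ : ∃ v, PySem.List.pyGet? row a = some v :=
      ⟨_, PySem.List.pyGet?_eq_some_getElem row h0a halen⟩
    rw [PySem.List.pyRange_one_cons (show a < N by omega),
        PySem.List.pyRange_one_cons ha, loF_cons, hv,
        bLoop_cons_some row j a _ s N v hv]
    simp only [Option.getD_some]
    by_cases hz : v = 0
    · rw [if_pos hz, if_pos hz, if_neg (show ¬ (s ≤ j ∧ j < a) by omega)]
      exact ih (a + 1) (a + 1) (by omega) (by omega) (by omega) (by omega)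
    · rw [if_neg hz, if_neg hz]
      exact ih (a + 1) s (by omega) (by omega) (by omega) hs

-- A's left loop counts back to the run start loF
lemma aLeft_eq (row : List Int) :
    ∀ (n : Nat) (a t c : Int), (t - a).toNat = n → 0 ≤ a → a ≤ t → t ≤ (row.length : Int) →
      aLeft row ((PySem.List.pyRange a t 1).reverse) c =
        c + t - loF row (PySem.List.pyRange a t 1) a := by
  intro n
  induction n with
  | zero =>
    intro a t c hn h0a hat htl
    obtain rfl : t = a := by omega
    rw [PySem.List.pyRange_one_eq_nil (le_refl t), loF_nil, List.reverse_nil, aLeft_nil]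
    omega
  | succ n ih =>
    intro a t c hn h0a hat htl
    have ha : a < t := by omega
    have hsplit : PySem.List.pyRange a t 1 = PySem.List.pyRange a (t - 1) 1 ++ [t - 1] := by
      have := PySem.List.pyRange_one_succ_right (a := a) (b := t - 1) (by omega)
      simpa [show t - 1 + 1 = t by omega] using this
    have h0t : 0 ≤ t - 1 := by omega
    have htlen : t - 1 < (row.length : Int) := by omega
    obtain ⟨v, hv⟩ : ∃ v, PySem.List.pyGet? row (t - 1) = some v :=
      ⟨_, PySem.List.pyGet?_eq_some_getElem row h0t htlen⟩
    have hfold : loF row (PySem.List.pyRange a (t - 1) 1 ++ [t - 1]) a =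
        if v = 0 then t else loF row (PySem.List.pyRange a (t - 1) 1) a := by
      unfold loF
      rw [List.foldl_append]
      simp only [List.foldl_cons, List.foldl_nil, hv, Option.getD_some]
      by_cases hz : v = 0
      · rw [if_pos hz, if_pos hz]; omega
      · rw [if_neg hz, if_neg hz]
    rw [hsplit, List.reverse_append, List.reverse_singleton, List.singleton_append,
        aLeft_cons_some row (t - 1) _ c v hv, hfold]
    by_cases hz : v = 0
    · rw [if_pos hz, if_pos hz]
      omega
    · rw [if_neg hz, if_neg hz, ih a (t - 1) (c + 1) (by omega) h0a (by omega) (by omega)]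
      omega

-- ===== VERDICT (by name: the statement is the Claim_ definition above) =====
theorem acrossHelper_spec : Claim_equal_acrossHelper := by
  intro i j board N _ hpre
  obtain ⟨hiR, hjR, hcase⟩ := hpre
  unfold Spec_acrossHelper acrossHelper acrossHelper_alt
  obtain ⟨row, hrow⟩ : ∃ row, PySem.List.pyGet? board i = some row := by
    cases h : PySem.List.pyGet? board i with
    | none => exact absurd ((PySem.List.pyGet?_eq_none_iff board i).mp h) (not_not_intro hiR)
    | some r => exact ⟨r, rfl⟩
  have hrowD : PySem.List.pyGetD board i [] = row := by
    simp [PySem.List.pyGetD, hrow]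
  rw [hrowD] at hjR hcase
  obtain ⟨vj, hvj⟩ : ∃ vj, PySem.List.pyGet? row j = some vj := by
    cases h : PySem.List.pyGet? row j with
    | none => exact absurd ((PySem.List.pyGet?_eq_none_iff row j).mp h) (not_not_intro hjR)
    | some v => exact ⟨v, rfl⟩
  have hvD : PySem.List.pyGetD row j 0 = vj := by
    simp [PySem.List.pyGetD, hvj]
  rw [hvD] at hcase
  simp only [hrow, hvj]
  by_cases h1 : vj = 1
  · obtain ⟨h0j, hjN, hNlen⟩ : 0 ≤ j ∧ j < N ∧ N ≤ ((row.length : Nat) : Int) := by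
      rcases hcase with h | h
      · exact absurd h1 h
      · exact h
    rw [if_pos h1, if_neg (by simp [h1])]
    have hvj0 : vj ≠ 0 := by rw [h1]; norm_num
    have hlo_le : loF row (PySem.List.pyRange 0 j 1) 0 ≤ j := by
      apply loF_le
      · intro k hk
        rw [PySem.List.mem_pyRange_one] at hk
        omega
      · exact h0j
    rw [bLoop_phase1 row j N hjN hNlen vj hvj hvj0 (j - 0).toNat 0 0 rfl
        (le_refl 0) h0j h0j]
    rw [bLoop_eq_aRight row j N hNlen (N - (j + 1)).toNat (j + 1)
        (loF row (PySem.List.pyRange 0 j 1) 0) 1 rfl h0j (by omega) (by omega) hlo_le]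
    rw [aLeft_eq row (j - 0).toNat 0 j
        (aRight row (PySem.List.pyRange (j + 1) N 1) 1) rfl (le_refl 0) h0j (by omega)]
    omega
  · rw [if_neg h1, if_pos h1]
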